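-- pv_equiv track=rewrite | github.com/skurusamy/Leetcode | formString.py | formString
-- ===== SOURCE A (Python) =====
-- def formString(s1,s2):
--     SubString = 0
--     remaining = s2
--     while(remaining):
--         subseq = []
--         i =0
--         j =0
--         while i< len(s1) and j < len(remaining):
--             if s1[i] == remaining[j]:
--                 subseq.append(remaining[j])
--                 j += 1
--             i += 1
--         if len(subseq) == 0:
--             return -1
--         SubString += 1
--         remaining = remaining[j:]
--     return SubString
-- ===== SOURCE B (Python) =====
-- def formString(s1, s2):
--     if not s2:
--         return 0
--     passes = 1
--     i = 0
--     for c in s2: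
--         k = s1.find(c, i)
--         if k == -1:
--             k = s1.find(c)
--             if k == -1:
--                 return -1
--             passes += 1
--         i = k + 1
--     return passes
-- ===== Notes on version B (the rewrite author's own statement) =====
-- stated objective: faster
-- what changed: Replaces A's nested while-loops that build a subsequence list and repeatedly slice the remaining string with a single pass over s2 that advances a pointer into s1 via str.find, counting wrap-arounds.
import Mathlib
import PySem

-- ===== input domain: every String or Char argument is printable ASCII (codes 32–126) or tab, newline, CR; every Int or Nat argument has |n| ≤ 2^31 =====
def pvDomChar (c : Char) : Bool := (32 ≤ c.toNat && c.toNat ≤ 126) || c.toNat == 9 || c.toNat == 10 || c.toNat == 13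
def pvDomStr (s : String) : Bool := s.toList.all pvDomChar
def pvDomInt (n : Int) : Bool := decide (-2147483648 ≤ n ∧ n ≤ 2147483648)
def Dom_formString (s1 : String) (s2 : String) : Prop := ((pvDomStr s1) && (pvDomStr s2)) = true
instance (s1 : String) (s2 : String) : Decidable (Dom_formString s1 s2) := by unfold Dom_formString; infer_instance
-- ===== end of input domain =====

-- B replaces A's nested scan/slice passes by a single pass over s2 with a find-pointer into s1 (simpler; return value proved equal).

-- B replaces A's nested scan/slice passes by a single pass over s2 with a find-pointer into s1 (simpler; return value proved equal).

-- ===== PORT A =====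
-- inner while loop of A: i walks along s1 (here: along the suffix s1c of s1), greedily matching
-- remaining[j] and collecting subseq exactly as the Python does
def formStringInner (s1c : List Char) (rem subseq : List Char) (j : Nat) : List Char × Nat :=
  match s1c with
  | [] => (subseq, j)
  | a :: rest =>
    if hj : j < rem.length then
      if a = rem[j]'hj then formStringInner rest rem (subseq ++ [rem[j]'hj]) (j+1)
      else formStringInner rest rem subseq j
    else (subseq, j)

-- needed by the outer loop's termination: subseq grows exactly as j does
theorem formStringInner_len : ∀ (s1c rem subseq : List Char) (j : Nat),
    (formStringInner s1c rem subseq j).1.length + j = (formStringInner s1c rem subseq j).2 + subseq.length := by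
  intro s1c
  induction s1c with
  | nil => intro rem subseq j; simp [formStringInner]; omega
  | cons a rest ih =>
    intro rem subseq j
    rw [formStringInner]
    by_cases hj : j < rem.length
    · rw [dif_pos hj]
      by_cases heq : a = rem[j]'hj
      · rw [if_pos heq]
        have h := ih rem (subseq ++ [rem[j]'hj]) (j+1)
        rw [List.length_append] at h
        simp only [List.length_cons, List.length_nil] at h
        omega
      · rw [if_neg heq]
        exact ih rem subseq j
    · rw [dif_neg hj]
      show subseq.length + j = j + subseq.length
      omega

-- decreasing measure for the outer loop
theorem formStringOuter_dec (s1 rem : List Char) (hrem : ¬ rem = [])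
    (h : ¬ (formStringInner s1 rem [] 0).1 = []) :
    (rem.drop (formStringInner s1 rem [] 0).2).length < rem.length := by
  have hl := formStringInner_len s1 rem [] 0
  simp only [List.length_nil, Nat.add_zero] at hl
  have h1 : 0 < (formStringInner s1 rem [] 0).1.length := List.length_pos_of_ne_nil h
  have h2 : 0 < rem.length := List.length_pos_of_ne_nil hrem
  simp only [List.length_drop]
  omega

-- outer while loop of A
def formStringOuter (s1 rem : List Char) (acc : Int) : Int :=
  if hrem : rem = [] then acc
  else
    let p := formStringInner s1 rem [] 0
    if p.1 = [] then -1
    else formStringOuter s1 (rem.drop p.2) (acc + 1)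
termination_by rem.length
decreasing_by
  exact formStringOuter_dec s1 rem hrem (by assumption)

def formString (s1 : String) (s2 : String) : Int :=
  formStringOuter s1.toList s2.toList 0

-- ===== PORT B =====
-- s.find(c, i) of Source B, ported by hand: first index ≥ i where the (single) character c occurs;
-- exact for 0 ≤ i (Source B only calls it with 0 ≤ i ≤ len(s1)).  Returned as Option (none = -1).
def findFrom (t : List Char) (i : Nat) (c : Char) : Option Nat :=
  if h : i < t.length then
    if t[i]'h = c then some i else findFrom t (i+1) c
  else none
termination_by t.length - i

-- the for-loop of Source B
def formStringGo (s1 cs : List Char) (passes : Int) (i : Nat) : Int :=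
  match cs with
  | [] => passes
  | c :: rest =>
    match findFrom s1 i c with
    | some k => formStringGo s1 rest passes (k+1)
    | none =>
      match findFrom s1 0 c with
      | some k => formStringGo s1 rest (passes + 1) (k+1)
      | none => -1

def formString_alt (s1 : String) (s2 : String) : Int :=
  if s2.toList = [] then 0 else formStringGo s1.toList s2.toList 1 0

-- ===== PRECONDITION & SPEC =====
def Spec_formString (s1 : String) (s2 : String) (out : Int) : Prop := out = formString_alt s1 s2
instance (s1 : String) (s2 : String) (out : Int) : Decidable (Spec_formString s1 s2 out) := by unfold Spec_formString; infer_instance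

-- ===== CLAIM (what is proved, stated in full; the proofs are below) =====
def Claim_equal_formString : Prop := ∀ (s1 : String) (s2 : String), Dom_formString s1 s2 → Spec_formString s1 s2 (formString s1 s2)

-- ===== LEMMAS AND PROOFS =====

-- greedy-match count from position i of s1 against cs, phrased with findFrom
def gm (t : List Char) (i : Nat) (cs : List Char) : Nat :=
  match cs with
  | [] => 0
  | c :: rest =>
    match findFrom t i c with
    | some k => gm t (k+1) rest + 1
    | none => 0

theorem gm_succ_of_ne (t : List Char) (i : Nat) (hi : i < t.length) (c : Char) (hne : ¬ t[i]'hi = c)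
    (rest : List Char) : gm t i (c :: rest) = gm t (i+1) (c :: rest) := by
  simp only [gm]
  rw [show findFrom t i c = findFrom t (i+1) c by rw [findFrom]; simp [hi, hne]]

theorem inner_snd (s1 rem : List Char) : ∀ (s1c : List Char) (i : Nat), s1c = s1.drop i →
    ∀ (j : Nat) (subseq : List Char),
    (formStringInner s1c rem subseq j).2 = j + gm s1 i (rem.drop j) := by
  intro s1c
  induction s1c with
  | nil =>
    intro i hdrop j subseq
    have hi : ¬ i < s1.length := by
      have := List.drop_eq_nil_iff.mp hdrop.symm
      omega
    show j = j + gm s1 i (rem.drop j)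
    rcases Nat.lt_or_ge j rem.length with hj | hj
    · rw [List.drop_eq_getElem_cons hj]
      simp only [gm]
      rw [show findFrom s1 i (rem[j]'hj) = none by rw [findFrom]; simp [hi]]
      simp
    · rw [List.drop_eq_nil_of_le hj]
      simp [gm]
  | cons a rest ih =>
    intro i hdrop j subseq
    have hi : i < s1.length := by
      by_contra hc
      rw [List.drop_eq_nil_of_le (by omega)] at hdrop
      simp at hdrop
    have hcons : s1.drop i = (s1[i]'hi) :: s1.drop (i+1) := List.drop_eq_getElem_cons hi
    rw [hcons] at hdrop
    injection hdrop with ha hrest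
    rw [formStringInner]
    by_cases hj : j < rem.length
    · rw [dif_pos hj]
      by_cases heq : a = rem[j]'hj
      · rw [if_pos heq]
        rw [ih (i+1) hrest (j+1) (subseq ++ [rem[j]'hj])]
        rw [List.drop_eq_getElem_cons hj]
        simp only [gm]
        rw [show findFrom s1 i (rem[j]'hj) = some i by
          rw [findFrom]; simp only [hi, dite_true]; rw [if_pos (ha ▸ heq)]]
        show j + 1 + gm s1 (i+1) (rem.drop (j+1)) = j + (gm s1 (i+1) (rem.drop (j+1)) + 1)
        omega
      · rw [if_neg heq]
        rw [ih (i+1) hrest j subseq]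
        rw [List.drop_eq_getElem_cons hj, gm_succ_of_ne s1 i hi (rem[j]'hj) (fun hc => heq (ha ▸ hc))]
    · rw [dif_neg hj]
      show j = j + gm s1 i (rem.drop j)
      rw [List.drop_eq_nil_of_le (by omega)]
      simp [gm]

-- the segment lemma: B's loop consumes a maximal greedy prefix without incrementing passes
theorem go_seg (s1 : List Char) : ∀ (cs : List Char) (i : Nat) (passes : Int),
    formStringGo s1 cs passes i =
      match cs.drop (gm s1 i cs) with
      | [] => passes
      | c' :: rest' =>
        match findFrom s1 0 c' with
        | some k => formStringGo s1 rest' (passes + 1) (k+1)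
        | none => -1 := by
  intro cs
  induction cs with
  | nil => intro i passes; simp [gm, formStringGo]
  | cons c rest ih =>
    intro i passes
    simp only [gm, formStringGo]
    cases hf : findFrom s1 i c with
    | some k => simpa using ih (k+1) passes
    | none => simp

theorem outer_eq_go_aux (s1 : List Char) : ∀ (n : Nat) (rem : List Char), rem.length ≤ n → rem ≠ [] → ∀ acc : Int,
    formStringOuter s1 rem acc = formStringGo s1 rem (acc + 1) 0 := by
  intro n
  induction n with
  | zero => intro rem hlen hne; exact absurd (List.length_eq_zero_iff.mp (Nat.le_zero.mp hlen)) hne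
  | succ n ih =>
    intro rem hlen hne acc
    rw [formStringOuter]
    simp only [hne, dite_false]
    have hj : (formStringInner s1 rem [] 0).2 = gm s1 0 rem := by
      simpa using inner_snd s1 rem s1 0 (by simp) 0 []
    have hl : (formStringInner s1 rem [] 0).1.length = (formStringInner s1 rem [] 0).2 := by
      have := formStringInner_len s1 rem [] 0; simpa using this
    by_cases hp : (formStringInner s1 rem [] 0).1 = []
    · simp only [hp, if_true]
      have h0 : gm s1 0 rem = 0 := by rw [← hj, ← hl, hp]; simp
      obtain ⟨c, rest, rfl⟩ := List.exists_cons_of_ne_nil hne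
      have hfind : findFrom s1 0 c = none := by
        cases hf : findFrom s1 0 c with
        | none => rfl
        | some k => simp [gm, hf] at h0
      simp [formStringGo, hfind]
    · simp only [hp, if_false]
      have hpos : 0 < gm s1 0 rem := by
        rw [← hj, ← hl]; exact List.length_pos_of_ne_nil hp
      rw [go_seg s1 rem 0 (acc + 1), hj]
      cases hdrop : rem.drop (gm s1 0 rem) with
      | nil => simp [formStringOuter]
      | cons c' rest' =>
        have hlt : (c' :: rest').length ≤ n := by
          have h1 := List.length_pos_of_ne_nil hne
          have h2 := congrArg List.length hdrop
          simp only [List.length_drop, List.length_cons] at h2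
          simp only [List.length_cons]
          omega
        rw [ih (c' :: rest') hlt (by simp) (acc + 1)]
        cases hf : findFrom s1 0 c' with
        | some k => simp [formStringGo, hf]
        | none => simp [formStringGo, hf]

theorem outer_eq_go (s1 : List Char) : ∀ (rem : List Char), rem ≠ [] → ∀ acc : Int,
    formStringOuter s1 rem acc = formStringGo s1 rem (acc + 1) 0 :=
  fun rem => outer_eq_go_aux s1 rem.length rem (le_refl _)

-- ===== VERDICT (by name: the statement is the Claim_ definition above) =====
theorem formString_spec : Claim_equal_formString := by
  intro s1 s2 _
  unfold Spec_formString formString formString_alt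
  by_cases h : s2.toList = []
  · simp [h, formStringOuter]
  · simp only [h, if_false]
    have := outer_eq_go s1.toList s2.toList h 0
    simpa using this
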